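-- pv_equiv track=rewrite | github.com/pksm/MAC5788-Automated-Planning | grounding.py | generate
-- ===== SOURCE A (Python) =====
-- from itertools import product
--
-- def generate(typ,lit):
--     combList = []
--     if (len(typ)==1):
--         return lit[typ[0]]
--     for t in typ:
--         combList.append(lit[t])
--     allComb = list(product(*combList))
--     return allComb
-- ===== SOURCE B (Python) =====
-- def generate(typ, lit):
--     if len(typ) == 1:
--         return lit[typ[0]]
--     cols = [lit[t] for t in typ]
--     total = 1
--     for c in cols:
--         total *= len(c)
--     out = []
--     for i in range(total):
--         row = []
--         rem = i
--         for c in reversed(cols):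
--             rem, d = divmod(rem, len(c))
--             row.append(c[d])
--         out.append(tuple(reversed(row)))
--     return out
-- ===== Notes on version B (the rewrite author's own statement) =====
-- stated objective: alternative
-- what changed: Replaces itertools.product with mixed-radix index decoding: B computes the total number of combinations and, for each rank i in range(total), decodes i's mixed-radix digits right-to-left to pick one element per column, so no product machinery or incremental tuple extension is used.
-- outside the precondition, e.g. on generate(['a'], {'a': ['x', 'y']}): A returns ['x', 'y'], B returns ['x', 'y']
import Mathlib
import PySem

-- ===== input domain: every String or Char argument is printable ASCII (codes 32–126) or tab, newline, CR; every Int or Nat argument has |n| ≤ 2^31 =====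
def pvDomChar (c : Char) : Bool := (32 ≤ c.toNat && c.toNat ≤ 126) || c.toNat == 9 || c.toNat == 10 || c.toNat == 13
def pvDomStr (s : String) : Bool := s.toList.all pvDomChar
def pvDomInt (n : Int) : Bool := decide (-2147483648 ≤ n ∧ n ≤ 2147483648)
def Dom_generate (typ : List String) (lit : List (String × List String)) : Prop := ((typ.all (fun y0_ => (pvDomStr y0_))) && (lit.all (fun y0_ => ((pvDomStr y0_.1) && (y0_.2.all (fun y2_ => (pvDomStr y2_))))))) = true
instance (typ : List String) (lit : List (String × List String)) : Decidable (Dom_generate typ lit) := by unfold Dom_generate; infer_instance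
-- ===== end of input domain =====

-- B replaces A's collect-columns-then-itertools.product pipeline with mixed-radix
-- index decoding of each rank i in range(total) (objective: alternative; same cost).

-- dict lookup lit[t] (KeyError = none; inputs where it would raise are outside Pre_)
def pvLookup (lit : List (String × List String)) (t : String) : List String :=
  ((PySem.Dict.mk lit).get? t).getD []

-- ===== PORT A =====
-- itertools.product(*combList), leftmost factor slowest; exact for list-of-lists input
def pvProduct (ls : List (List String)) : List (List String) :=
  ls.foldr (fun xs acc => xs.flatMap (fun x => acc.map (fun q => x :: q))) [[]]

def generate (typ : List String) (lit : List (String × List String)) : List (List String) :=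
  if typ.length == 1 then
    -- Python returns here a raw list of strings (not of tuples); these inputs are
    -- outside Pre_generate, each string is rendered as a singleton list
    (pvLookup lit (typ.headD "")).map (fun s => [s])
  else
    let combList := typ.foldl (fun acc t => acc ++ [pvLookup lit t]) []
    pvProduct combList

-- ===== PORT B =====
-- Source B: cols via list comprehension; total = product of lengths; for each i the inner
-- loop over reversed(cols) does rem, d = divmod(rem, len(c)); row.append(c[d]) and the
-- row is finally reversed — ported as a cons-accumulating foldl over cols.reverse
-- (appending then reversing = consing).  getD's default "" is unreachable: d < len(c)
-- whenever the loop body runs (i < total), exactly as in Python.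
def generate_alt (typ : List String) (lit : List (String × List String)) : List (List String) :=
  if typ.length == 1 then
    (pvLookup lit (typ.headD "")).map (fun s => [s])
  else
    let cols := typ.map (fun t => pvLookup lit t)
    let total := cols.foldl (fun a c => a * c.length) 1
    (List.range total).map (fun i =>
      (cols.reverse.foldl
        (fun (p : Nat × List String) c => (p.1 / c.length, c.getD (p.1 % c.length) "" :: p.2))
        (i, ([] : List String))).2)

-- ===== PRECONDITION & SPEC =====
-- Pre_ excludes (i) inputs where some t in typ is not a key of lit (Python A raises
-- KeyError there), and (ii) single-element typ, where A returns a bare list of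
-- strings — a value outside the declared return type List (List String).
def Pre_generate (typ : List String) (lit : List (String × List String)) : Prop :=
  typ.length ≠ 1 ∧ ∀ t ∈ typ, (PySem.Dict.mk lit).contains t = true
instance (typ : List String) (lit : List (String × List String)) : Decidable (Pre_generate typ lit) := by unfold Pre_generate; infer_instance
def pvWitness_generate : List String × (List (String × List String)) :=
  (["a", "b"], [("a", ["x", "y"]), ("b", ["z"])])

def Spec_generate (typ : List String) (lit : List (String × List String)) (out : List (List String)) : Prop := out = generate_alt typ lit
instance (typ : List String) (lit : List (String × List String)) (out : List (List String)) : Decidable (Spec_generate typ lit out) := by unfold Spec_generate; infer_instance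

-- ===== CLAIM (what is proved, stated in full; the proofs are below) =====
def Claim_equal_generate : Prop := ∀ (typ : List String) (lit : List (String × List String)), Dom_generate typ lit → Pre_generate typ lit → Spec_generate typ lit (generate typ lit)

-- ===== LEMMAS AND PROOFS =====

-- B's inner loop, written as a foldr over cols (= foldl over cols.reverse)
def pvDec (cols : List (List String)) (st : Nat × List String) : Nat × List String :=
  cols.foldr (fun c p => (p.1 / c.length, c.getD (p.1 % c.length) "" :: p.2)) st

theorem pvDec_eq_foldl (cols : List (List String)) (st : Nat × List String) :
    cols.reverse.foldl
      (fun (p : Nat × List String) c => (p.1 / c.length, c.getD (p.1 % c.length) "" :: p.2)) st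
      = pvDec cols st := by
  rw [List.foldl_reverse]; rfl

theorem pv_total_eq_prod (cols : List (List String)) :
    cols.foldl (fun a c => a * c.length) 1 = (cols.map List.length).prod := by
  rw [List.prod_eq_foldl, List.foldl_map]

-- building combList by appending singletons is mapping
theorem pv_foldl_append_map (f : String → List String) (l : List String) (acc : List (List String)) :
    l.foldl (fun a t => a ++ [f t]) acc = acc ++ l.map f := by
  induction l generalizing acc with
  | nil => simp
  | cons x xs ih => simp [List.foldl_cons, ih, List.append_assoc]

theorem pvDec_cons (c : List String) (cs : List (List String)) (st : Nat × List String) :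
    pvDec (c :: cs) st
      = ((pvDec cs st).1 / c.length,
         c.getD ((pvDec cs st).1 % c.length) "" :: (pvDec cs st).2) := rfl

theorem pvDec_fst (cols : List (List String)) (i : Nat) (acc : List String) :
    (pvDec cols (i, acc)).1 = i / (cols.map List.length).prod := by
  induction cols generalizing i with
  | nil => simp [pvDec]
  | cons c cs ih =>
      rw [pvDec_cons]
      simp only
      rw [ih, Nat.div_div_eq_div_mul, List.map_cons, List.prod_cons, Nat.mul_comm]

theorem pvDec_snd_mod (cols : List (List String)) (pos : ∀ c ∈ cols, 0 < c.length)
    (i : Nat) :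
    (pvDec cols (i % (cols.map List.length).prod, [])).2 = (pvDec cols (i, [])).2 := by
  induction cols generalizing i with
  | nil => simp [pvDec]
  | cons c cs ih =>
      have posc : 0 < c.length := pos c (by simp)
      have poscs : ∀ c' ∈ cs, 0 < c'.length := fun c' h => pos c' (by simp [h])
      rw [List.map_cons, List.prod_cons, pvDec_cons, pvDec_cons]
      simp only
      rw [pvDec_fst, pvDec_fst]
      have hdig : i % (c.length * (cs.map List.length).prod) / (cs.map List.length).prod % c.length
          = i / (cs.map List.length).prod % c.length := by
        rw [Nat.mul_comm, Nat.mod_mul_right_div_self]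
        exact Nat.mod_mod_of_dvd _ dvd_rfl
      have htail : (pvDec cs (i % (c.length * (cs.map List.length).prod), [])).2
          = (pvDec cs (i, [])).2 := by
        rw [← ih poscs (i % (c.length * (cs.map List.length).prod))]
        rw [Nat.mod_mod_of_dvd i (dvd_mul_left (cs.map List.length).prod c.length)]
        exact ih poscs i
      rw [hdig, htail]

-- range (a*b) as blocks of b
theorem pv_range_mul (a b : Nat) :
    List.range (a * b) = (List.range a).flatMap (fun j => (List.range b).map (fun k => j * b + k)) := by
  induction a with
  | zero => simp
  | succ a ih =>
      rw [Nat.succ_mul, List.range_add, ih, List.range_succ, List.flatMap_append]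
      simp

-- index a flatMap over a list by positions
theorem pv_flatMap_index {α β : Type} (l : List α) (f : α → List β) (d : α) :
    l.flatMap f = (List.range l.length).flatMap (fun j => f (l.getD j d)) := by
  induction l with
  | nil => simp
  | cons x xs ih =>
      rw [List.flatMap_cons, List.length_cons, List.range_succ_eq_map, List.flatMap_cons,
        List.flatMap_map, ih]
      simp

theorem pv_main (cols : List (List String)) (pos : ∀ c ∈ cols, 0 < c.length) :
    (List.range (cols.map List.length).prod).map (fun i => (pvDec cols (i, [])).2)
      = pvProduct cols := by
  induction cols with
  | nil => simp [pvDec, pvProduct]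
  | cons c cs ih =>
      have posc : 0 < c.length := pos c (by simp)
      have poscs : ∀ c' ∈ cs, 0 < c'.length := fun c' h => pos c' (by simp [h])
      have hP : 0 < (cs.map List.length).prod := by
        apply List.prod_pos
        intro x hx
        obtain ⟨c', hc', rfl⟩ := List.mem_map.mp hx
        exact poscs c' hc'
      rw [List.map_cons, List.prod_cons, pv_range_mul, List.map_flatMap]
      show (List.range c.length).flatMap
          (fun j => ((List.range ((cs.map List.length).prod)).map
            (fun k => j * (cs.map List.length).prod + k)).map (fun i => (pvDec (c :: cs) (i, [])).2))
        = pvProduct (c :: cs)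
      have hrhs : pvProduct (c :: cs)
          = (List.range c.length).flatMap
              (fun j => (pvProduct cs).map (fun q => c.getD j "" :: q)) := by
        show c.flatMap (fun x => (pvProduct cs).map (fun q => x :: q)) = _
        exact pv_flatMap_index c (fun x => (pvProduct cs).map (fun q => x :: q)) ""
      rw [hrhs]
      apply List.flatMap_congr
      intro j hj
      have hjlt : j < c.length := List.mem_range.mp hj
      rw [← ih poscs, List.map_map, List.map_map]
      apply List.map_congr_left
      intro k hk
      have hklt : k < (cs.map List.length).prod := List.mem_range.mp hk
      simp only [Function.comp]
      rw [pvDec_cons]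
      simp only
      have hfst : (pvDec cs (j * (cs.map List.length).prod + k, [])).1 = j := by
        rw [pvDec_fst, Nat.mul_comm j, Nat.mul_add_div hP, Nat.div_eq_of_lt hklt, Nat.add_zero]
      have htl : (pvDec cs (j * (cs.map List.length).prod + k, [])).2 = (pvDec cs (k, [])).2 := by
        rw [← pvDec_snd_mod cs poscs (j * (cs.map List.length).prod + k), Nat.mul_comm j,
          Nat.mul_add_mod, Nat.mod_eq_of_lt hklt]
      rw [hfst, htl, Nat.mod_eq_of_lt hjlt]

theorem pvProduct_of_zero (cols : List (List String)) (h : ∃ c ∈ cols, c.length = 0) :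
    pvProduct cols = [] := by
  induction cols with
  | nil => simp at h
  | cons c cs ih =>
      obtain ⟨c', hc', h0⟩ := h
      rcases List.mem_cons.mp hc' with rfl | hmem
      · have : c' = [] := List.eq_nil_of_length_eq_zero h0
        subst this
        simp [pvProduct]
      · show c.flatMap (fun x => (pvProduct cs).map (fun q => x :: q)) = []
        rw [ih ⟨c', hmem, h0⟩]
        simp

-- ===== VERDICT (by name: the statement is the Claim_ definition above) =====
theorem generate_spec : Claim_equal_generate := by
  intro typ lit _ hpre
  rcases hpre with ⟨hlen, _⟩
  unfold Spec_generate generate generate_alt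
  have h1 : (typ.length == 1) = false := by simp [hlen]
  rw [h1]
  simp only [Bool.false_eq_true, if_false]
  rw [pv_foldl_append_map (pvLookup lit) typ []]
  simp only [List.nil_append, pvDec_eq_foldl, pv_total_eq_prod]
  by_cases hp : ∀ c ∈ typ.map (fun t => pvLookup lit t), 0 < c.length
  · exact (pv_main _ hp).symm
  · push Not at hp
    obtain ⟨c, hc, h0⟩ := hp
    have h0' : c.length = 0 := Nat.le_zero.mp h0
    have hz : ((typ.map (fun t => pvLookup lit t)).map List.length).prod = 0 :=
      List.prod_eq_zero (List.mem_map.mpr ⟨c, hc, h0'⟩)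
    rw [pvProduct_of_zero _ ⟨c, hc, h0'⟩, hz]
    simp
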